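-- pv_equiv track=rewrite | github.com/gavin4d/Fibonacci-Magic | functions.py | fiboarray_extended
-- ===== SOURCE A (Python) =====
-- def fiboarray(n):
--     fibo = [0,1]
--     for i in range (2,n):
--         fibo.append(fibo[i-1] + fibo[i-2])
--     return fibo
--
-- def fiboarray_extended(a,b):
--     max_fibo = fiboarray(max(abs(a),abs(b))+1)
--
--     output = []
--
--     for i in range (a,b):
--         if (i < 0):
--             output.append(-int(pow(-1,i)) * max_fibo[-i])
--         else:
--             output.append(max_fibo[i])
--     return output
-- ===== SOURCE B (Python) =====
-- def fiboarray_extended(a, b):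
--     # Fast doubling to F(a), F(a+1), then one forward pass over the window.
--     if b <= a:
--         return []
--
--     def fd(n):  # n >= 0 -> (F(n), F(n+1)) by fast doubling
--         if n == 0:
--             return (0, 1)
--         f, g = fd(n >> 1)
--         c = f * (2 * g - f)
--         d = f * f + g * g
--         if n & 1:
--             return (d, c + d)
--         return (c, d)
--
--     n = abs(a)
--     f, g = fd(n)
--     if a < 0:
--         # F(-n) = (-1)^(n+1) F(n);  F(-n+1) = (-1)^n F(n-1) with F(n-1) = g - f
--         if n % 2 == 0:
--             f, g = -f, g - f
--         else:
--             f, g = f, -(g - f)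
--
--     out = []
--     for _ in range(b - a):
--         out.append(f)
--         f, g = g, f + g
--     return out
-- ===== Notes on version B (the rewrite author's own statement) =====
-- stated objective: faster
-- what changed: Instead of building the full Fibonacci table up to max(|a|,|b|) and indexing into it with sign fix-ups, B computes F(a) and F(a+1) directly by fast doubling (with the negative-index reflection applied once) and then emits the window [a,b) in a single forward Fibonacci pass.
import Mathlib
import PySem

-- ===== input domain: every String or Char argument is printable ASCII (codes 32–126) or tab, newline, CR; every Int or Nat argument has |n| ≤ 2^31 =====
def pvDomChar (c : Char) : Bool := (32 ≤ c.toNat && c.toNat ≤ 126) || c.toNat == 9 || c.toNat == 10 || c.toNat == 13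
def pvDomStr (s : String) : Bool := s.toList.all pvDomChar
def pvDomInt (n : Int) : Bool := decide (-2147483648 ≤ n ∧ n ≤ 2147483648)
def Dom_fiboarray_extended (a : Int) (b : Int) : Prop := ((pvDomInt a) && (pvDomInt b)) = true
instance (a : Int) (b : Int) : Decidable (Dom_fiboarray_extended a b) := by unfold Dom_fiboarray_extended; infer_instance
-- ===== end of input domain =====

-- B replaces A's O(max(|a|,|b|)) table of all Fibonacci numbers up to the largest index by
-- fast doubling to F(a),F(a+1) followed by one forward pass over the window [a,b).

-- ===== PORT A =====
-- exact port of Python's `-int(pow(-1, i))` for integer i: pow(-1,i) is ±1 (±1.0 for i<0,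
-- int() of which is exact), with sign decided by the parity of i
def pvNegPowNeg1 (i : Int) : Int := if i % 2 = 0 then -1 else 1

def fiboarrayA (n : Int) : List Int :=
  (PySem.List.pyRange 2 n 1).foldl
    (fun fibo i => fibo ++ [PySem.List.pyGetD fibo (i - 1) 0 + PySem.List.pyGetD fibo (i - 2) 0])
    [0, 1]

def fiboarray_extended (a : Int) (b : Int) : List Int :=
  let max_fibo := fiboarrayA (max |a| |b| + 1)
  (PySem.List.pyRange a b 1).foldl
    (fun output i =>
      if i < 0 then output ++ [pvNegPowNeg1 i * PySem.List.pyGetD max_fibo (-i) 0]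
      else output ++ [PySem.List.pyGetD max_fibo i 0])
    []

-- ===== PORT B =====
-- fast doubling: pvFd n = (F(n), F(n+1));  Python's `n >> 1` is n / 2, `n & 1` is n % 2
def pvFd (n : Nat) : Int × Int :=
  if h : n = 0 then (0, 1)
  else
    let p := pvFd (n / 2)
    let f := p.1
    let g := p.2
    let c := f * (2 * g - f)
    let d := f * f + g * g
    if n % 2 = 1 then (d, c + d) else (c, d)
termination_by n
decreasing_by exact Nat.div_lt_self (Nat.pos_of_ne_zero h) (by norm_num)

-- the forward pass: `for _ in range(k): out.append(f); f, g = g, f + g`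
def pvWindow (k : Nat) (f g : Int) : List Int :=
  match k with
  | 0 => []
  | k + 1 => f :: pvWindow k g (f + g)

def fiboarray_extended_alt (a : Int) (b : Int) : List Int :=
  if b ≤ a then []
  else
    let n := a.natAbs
    let p := pvFd n
    let q : Int × Int :=
      if a < 0 then
        if n % 2 = 0 then (-p.1, p.2 - p.1) else (p.1, -(p.2 - p.1))
      else p
    pvWindow (b - a).toNat q.1 q.2

-- ===== PRECONDITION & SPEC =====
def Spec_fiboarray_extended (a : Int) (b : Int) (out : List Int) : Prop := out = fiboarray_extended_alt a b
instance (a : Int) (b : Int) (out : List Int) : Decidable (Spec_fiboarray_extended a b out) := by unfold Spec_fiboarray_extended; infer_instance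

-- ===== CLAIM (what is proved, stated in full; the proofs are below) =====
def Claim_equal_fiboarray_extended : Prop := ∀ (a : Int) (b : Int), Dom_fiboarray_extended a b → Spec_fiboarray_extended a b (fiboarray_extended a b)

-- ===== LEMMAS AND PROOFS =====

-- the extended Fibonacci function: fibZ i = F(i), with F(-n) = (-1)^(n+1) F(n)
def fibZ : Int → Int
  | Int.ofNat n => Nat.fib n
  | Int.negSucc n => (-1) ^ n * Nat.fib (n + 1)

theorem fibZ_rec (i : Int) : fibZ i + fibZ (i + 1) = fibZ (i + 2) := by
  match i with
  | Int.ofNat n =>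
      show fibZ (Int.ofNat n) + fibZ (Int.ofNat (n+1)) = fibZ (Int.ofNat (n+2))
      simp [fibZ, Nat.fib_add_two]
  | Int.negSucc 0 => decide
  | Int.negSucc 1 => decide
  | Int.negSucc (m+2) =>
      show fibZ (Int.negSucc (m+2)) + fibZ (Int.negSucc (m+1)) = fibZ (Int.negSucc m)
      simp [fibZ, pow_succ, Nat.fib_add_two]
      ring

theorem fib_two_mul_int (m : Nat) :
    (Nat.fib (2 * m) : Int) = Nat.fib m * (2 * Nat.fib (m + 1) - Nat.fib m) := by
  have h := Nat.fib_two_mul m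
  have hle : Nat.fib m ≤ 2 * Nat.fib (m + 1) :=
    le_trans (Nat.fib_le_fib_succ) (by omega)
  have hc := congrArg (Nat.cast : Nat → Int) h
  push_cast [Nat.sub_mul, hle] at hc
  exact hc.trans (by ring)

theorem fib_two_mul_add_one_int (m : Nat) :
    (Nat.fib (2 * m + 1) : Int) = Nat.fib (m + 1) * Nat.fib (m + 1) + Nat.fib m * Nat.fib m := by
  have hc := congrArg (Nat.cast : Nat → Int) (Nat.fib_two_mul_add_one m)
  push_cast at hc
  exact hc.trans (by ring)

theorem fib_step_int (m : Nat) : (Nat.fib (m + 2) : Int) = Nat.fib m + Nat.fib (m + 1) := by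
  have := Nat.fib_add_two (n := m); push_cast [this]; ring

theorem pvFd_eq (n : Nat) : pvFd n = ((Nat.fib n : Int), (Nat.fib (n + 1) : Int)) := by
  induction n using Nat.strong_induction_on with
  | _ n ih =>
    rw [pvFd]
    by_cases h : n = 0
    · simp [h]
    · simp only [h, dif_neg, not_false_iff]
      have ihm := ih (n / 2) (Nat.div_lt_self (Nat.pos_of_ne_zero h) (by norm_num))
      rw [ihm]
      rcases Nat.even_or_odd n with he | ho
      · obtain ⟨m, hm⟩ := he
        have hn : n = 2 * m := by omega
        have hd : n / 2 = m := by omega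
        rw [if_neg (by omega : ¬ n % 2 = 1)]
        refine Prod.ext ?_ ?_ <;> simp only [hd]
        · rw [hn, fib_two_mul_int]
        · rw [hn, fib_two_mul_add_one_int]; ring
      · obtain ⟨m, hm⟩ := ho
        have hd : n / 2 = m := by omega
        rw [if_pos (by omega : n % 2 = 1)]
        refine Prod.ext ?_ ?_ <;> simp only [hd]
        · rw [hm, fib_two_mul_add_one_int]; ring
        · rw [hm, show 2 * m + 1 + 1 = 2 * (m + 1) by ring, fib_two_mul_int (m + 1),
              fib_step_int m]
          ring

theorem fibZ_of_nonneg (i : Int) (h : 0 ≤ i) : fibZ i = Nat.fib i.toNat := by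
  match i, h with
  | Int.ofNat n, _ => rfl

theorem negSucc_succ_add_one (i : Nat) : Int.negSucc (i + 1) + 1 = Int.negSucc i := by
  rw [Int.negSucc_eq, Int.negSucc_eq]; push_cast; ring

theorem pvWindow_eq (k : Nat) : ∀ a : Int,
    pvWindow k (fibZ a) (fibZ (a + 1)) = (PySem.List.pyRange a (a + k) 1).map fibZ := by
  induction k with
  | zero =>
      intro a
      rw [pvWindow, PySem.List.pyRange_one_eq_nil (by omega)]
      rfl
  | succ k ih =>
      intro a
      rw [pvWindow]
      have hstep : fibZ a + fibZ (a + 1) = fibZ (a + 1 + 1) := by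
        rw [show a + 1 + 1 = a + 2 by ring]; exact fibZ_rec a
      rw [hstep, ih (a + 1)]
      have hr : a + ((k + 1 : Nat) : Int) = a + 1 + (k : Int) := by push_cast; ring
      rw [hr, PySem.List.pyRange_one_cons (by omega : a < a + 1 + (k : Int)), List.map_cons]

theorem pvStart (a : Int) :
    (if a < 0 then
       if a.natAbs % 2 = 0 then (-(pvFd a.natAbs).1, (pvFd a.natAbs).2 - (pvFd a.natAbs).1)
       else ((pvFd a.natAbs).1, -((pvFd a.natAbs).2 - (pvFd a.natAbs).1))
     else pvFd a.natAbs) = (fibZ a, fibZ (a + 1)) := by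
  match a with
  | Int.ofNat n =>
      have h0 : ¬ Int.ofNat n < 0 := not_lt.mpr (Int.natCast_nonneg n)
      rw [if_neg h0, pvFd_eq]
      have h1 : Int.ofNat n + 1 = Int.ofNat (n + 1) := rfl
      rw [h1]
      rfl
  | Int.negSucc j =>
      rw [if_pos (Int.negSucc_lt_zero j)]
      have hn : (Int.negSucc j).natAbs = j + 1 := rfl
      rw [hn, pvFd_eq]
      have hfib : (Nat.fib (j + 1 + 1) : Int) - Nat.fib (j + 1) = Nat.fib j := by
        rw [show j + 1 + 1 = j + 2 by omega, fib_step_int j]; ring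
      rcases Nat.even_or_odd j with hj | hj
      · have hj2 : j % 2 = 0 := Nat.even_iff.mp hj
        rw [if_neg (by omega : ¬ (j + 1) % 2 = 0)]
        refine Prod.ext ?_ ?_ <;> simp only
        · rw [show fibZ (Int.negSucc j) = (-1) ^ j * Nat.fib (j + 1) from rfl,
              hj.neg_one_pow]
          ring
        · rw [hfib]
          match j, hj2 with
          | 0, _ => decide
          | (i+1), hj2 =>
              rw [negSucc_succ_add_one,
                  show fibZ (Int.negSucc i) = (-1) ^ i * Nat.fib (i + 1) from rfl,
                  (by rw [Nat.odd_iff]; omega : Odd i).neg_one_pow]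
              ring
      · have hj2 : j % 2 = 1 := Nat.odd_iff.mp hj
        rw [if_pos (by omega : (j + 1) % 2 = 0)]
        refine Prod.ext ?_ ?_ <;> simp only
        · rw [show fibZ (Int.negSucc j) = (-1) ^ j * Nat.fib (j + 1) from rfl,
              hj.neg_one_pow]
          ring
        · rw [hfib]
          match j, hj2 with
          | (i+1), hj2 =>
              rw [negSucc_succ_add_one,
                  show fibZ (Int.negSucc i) = (-1) ^ i * Nat.fib (i + 1) from rfl,
                  (by rw [Nat.even_iff]; omega : Even i).neg_one_pow]
              ring

theorem fiboarrayA_aux (m : Nat) :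
    (PySem.List.pyRange 2 (2 + (m : Int)) 1).foldl
      (fun fibo i => fibo ++ [PySem.List.pyGetD fibo (i - 1) 0 + PySem.List.pyGetD fibo (i - 2) 0])
      [0, 1]
    = (List.range (2 + m)).map (fun k => (Nat.fib k : Int)) := by
  induction m with
  | zero =>
      rw [PySem.List.pyRange_one_eq_nil (by omega)]
      simp [List.range_succ]
  | succ m ih =>
      have hr : 2 + ((m + 1 : Nat) : Int) = (2 + (m : Int)) + 1 := by push_cast; ring
      rw [hr, PySem.List.pyRange_one_succ_right (by omega), List.foldl_append, ih]
      simp only [List.foldl_cons, List.foldl_nil]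
      have hlen : ((List.range (2 + m)).map (fun k => (Nat.fib k : Int))).length = 2 + m := by
        simp
      have hg1 : PySem.List.pyGetD ((List.range (2 + m)).map (fun k => (Nat.fib k : Int)))
          (2 + (m : Int) - 1) 0 = Nat.fib (m + 1) := by
        rw [show 2 + (m : Int) - 1 = ((m + 1 : Nat) : Int) by push_cast; ring,
            PySem.List.pyGetD_natCast]
        simp [List.getD_eq_getElem?_getD, List.getElem?_range (by omega : m + 1 < 2 + m)]
      have hg2 : PySem.List.pyGetD ((List.range (2 + m)).map (fun k => (Nat.fib k : Int)))
          (2 + (m : Int) - 2) 0 = Nat.fib m := by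
        rw [show 2 + (m : Int) - 2 = ((m : Nat) : Int) by ring,
            PySem.List.pyGetD_natCast]
        simp [List.getD_eq_getElem?_getD]
      rw [hg1, hg2, show 2 + (m + 1) = (2 + m) + 1 by omega, List.range_succ, List.map_append]
      congr 1
      simp only [List.map_cons, List.map_nil]
      congr 1
      rw [show 2 + m = m + 2 by omega, fib_step_int m]
      ring

theorem fiboarrayA_eq (n : Int) :
    fiboarrayA n = (List.range (max 2 n.toNat)).map (fun k => (Nat.fib k : Int)) := by
  by_cases h : n ≤ 2
  · rw [fiboarrayA, PySem.List.pyRange_one_eq_nil h, show max 2 n.toNat = 2 by omega]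
    simp [List.range_succ]
  · have hm : n = 2 + ((n - 2).toNat : Int) := by omega
    rw [fiboarrayA, hm, fiboarrayA_aux]
    congr 2
    omega

theorem portA_eq (a b : Int) :
    fiboarray_extended a b = (PySem.List.pyRange a b 1).map fibZ := by
  simp only [fiboarray_extended]
  have hfun : (fun (output : List Int) (i : Int) =>
        if i < 0 then output ++ [pvNegPowNeg1 i * PySem.List.pyGetD (fiboarrayA (max |a| |b| + 1)) (-i) 0]
        else output ++ [PySem.List.pyGetD (fiboarrayA (max |a| |b| + 1)) i 0])
      = (fun output i => output ++
          [if i < 0 then pvNegPowNeg1 i * PySem.List.pyGetD (fiboarrayA (max |a| |b| + 1)) (-i) 0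
           else PySem.List.pyGetD (fiboarrayA (max |a| |b| + 1)) i 0]) := by
    funext o i
    split_ifs <;> rfl
  rw [hfun, PySem.List.foldl_append_singleton_eq_map, List.nil_append]
  apply List.map_congr_left
  intro i hi
  rw [PySem.List.mem_pyRange_one] at hi
  have hc1 : b ≤ max |a| |b| := le_trans (le_abs_self b) (le_max_right _ _)
  have hc2 : -(max |a| |b|) ≤ a := by
    have := neg_abs_le a
    have := le_max_left |a| |b|
    omega
  have hc0 : 0 ≤ max |a| |b| := le_trans (abs_nonneg a) (le_max_left _ _)
  have hL : (max |a| |b| + 1).toNat ≤ max 2 (max |a| |b| + 1).toNat := le_max_right _ _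
  rw [fiboarrayA_eq]
  set R := (List.range (max 2 (max |a| |b| + 1).toNat)).map (fun k => (Nat.fib k : Int)) with hR
  have hlen : R.length = max 2 (max |a| |b| + 1).toNat := by simp [hR]
  by_cases hneg : i < 0
  · rw [if_pos hneg]
    rw [PySem.List.pyGetD_eq_getElem R (i := -i) 0 (by omega)
        (by rw [hlen]; push_cast; omega)]
    simp only [hR, List.getElem_map, List.getElem_range]
    cases i with
    | ofNat n => exact absurd hneg (not_lt.mpr (Int.natCast_nonneg n))
    | negSucc j =>
        have ht : (-(Int.negSucc j)).toNat = j + 1 := by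
          rw [Int.negSucc_eq]; omega
        have hz : fibZ (Int.negSucc j) = (-1) ^ j * Nat.fib (j + 1) := rfl
        have hpar : Int.negSucc j % 2 = 0 ↔ j % 2 = 1 := by
          rw [Int.negSucc_eq]; omega
        rw [ht, hz, pvNegPowNeg1]
        by_cases hj : j % 2 = 1
        · rw [if_pos (hpar.mpr hj), (Nat.odd_iff.mpr hj).neg_one_pow]
        · rw [if_neg (fun h => hj (hpar.mp h)),
              (Nat.even_iff.mpr (by omega)).neg_one_pow]
  · rw [if_neg hneg]
    rw [PySem.List.pyGetD_eq_getElem R (i := i) 0 (by omega)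
        (by rw [hlen]; push_cast; omega)]
    simp only [hR, List.getElem_map, List.getElem_range]
    rw [fibZ_of_nonneg i (by omega)]

theorem portB_eq (a b : Int) :
    fiboarray_extended_alt a b = (PySem.List.pyRange a b 1).map fibZ := by
  by_cases hba : b ≤ a
  · rw [fiboarray_extended_alt, if_pos hba, PySem.List.pyRange_one_eq_nil hba]
    rfl
  · simp only [fiboarray_extended_alt, if_neg hba]
    rw [pvStart a]
    simp only
    rw [pvWindow_eq ((b - a).toNat) a, show a + ((b - a).toNat : Int) = b by omega]

-- ===== VERDICT (by name: the statement is the Claim_ definition above) =====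
theorem fiboarray_extended_spec : Claim_equal_fiboarray_extended := by
  intro a b _
  unfold Spec_fiboarray_extended
  rw [portA_eq, portB_eq]
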